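-- pv_equiv track=rewrite | github.com/KALLIIOZ/Laberinto | LaberintoVfinal.py | encontrar_camino
-- ===== SOURCE A (Python) =====
-- def encontrar_camino(laberinto):
--     def encontrar_camino_recursivo(laberinto, fila, columna, camino_actual):
--         # Verificar si estamos fuera de los límites del laberinto o en una pared
--         if (fila < 0 or columna < 0 or fila >= len(laberinto) or columna >= len(laberinto[0]) or
--             laberinto[fila][columna] == 1):
--             return False
--
--         camino_actual.append((fila, columna))
--
--         if laberinto[fila][columna] == 2:
--             return True
--
--         elif laberinto[fila][columna] == 3:
--             # Transportar al jugador a la casilla 4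
--             camino_actual.pop()  # Quitar la posición actual
--             fila, columna = encontrar_casilla(laberinto, 4)
--             camino_actual.append((fila, columna))
--
--         elif laberinto[fila][columna] == 4:
--             # Transportar al jugador a la casilla 3
--             camino_actual.pop()  # Quitar la posición actual del camino
--             fila, columna = encontrar_casilla(laberinto, 3)
--             camino_actual.append((fila, columna))
--
--         # Marcar la posición actual como visitada
--         laberinto[fila][columna] = 1
--
--         # Buscar alrededor de la casilla en posición actual
--         if (encontrar_camino_recursivo(laberinto, fila + 1, columna, camino_actual) or
--             encontrar_camino_recursivo(laberinto, fila - 1, columna, camino_actual) or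
--             encontrar_camino_recursivo(laberinto, fila, columna + 1, camino_actual) or
--             encontrar_camino_recursivo(laberinto, fila, columna - 1, camino_actual)):
--             return True
--
--         # Si ninguna dirección lleva a la salida, retroceder y marcar la posición actual como no visitada
--         camino_actual.pop()
--         return False
--
--     def encontrar_casilla(laberinto, valor):
--         for fila in range(len(laberinto)):
--             for columna in range(len(laberinto[0])):
--                 if laberinto[fila][columna] == valor:
--                     return fila, columna
--         return -1, -1  # Devolver un valor predeterminado cuando la casilla no se encuentra
--
--     camino = []  # Este es el camino que toma
--     encontrar_camino_recursivo(laberinto, 0, 0, camino)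
--
--     return camino
-- ===== SOURCE B (Python) =====
-- def encontrar_camino(laberinto):
--     # Iterative DFS with an explicit stack of [fila, columna, next_dir_index] frames.
--     # Mutates `laberinto` in place (marks visited cells 1) exactly as the recursive version.
--     def encontrar_casilla(valor):
--         for fila in range(len(laberinto)):
--             for columna in range(len(laberinto[0])):
--                 if laberinto[fila][columna] == valor:
--                     return fila, columna
--         return -1, -1
--
--     direcciones = ((1, 0), (-1, 0), (0, 1), (0, -1))
--     camino = []
--     pila = []
--
--     def entrar(fila, columna):
--         # One call head: guard, goal test, teleport, mark, open a frame.
--         if (fila < 0 or columna < 0 or fila >= len(laberinto)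
--                 or columna >= len(laberinto[0]) or laberinto[fila][columna] == 1):
--             return False
--         camino.append((fila, columna))
--         if laberinto[fila][columna] == 2:
--             return True
--         if laberinto[fila][columna] == 3:
--             camino.pop()
--             fila, columna = encontrar_casilla(4)
--             camino.append((fila, columna))
--         elif laberinto[fila][columna] == 4:
--             camino.pop()
--             fila, columna = encontrar_casilla(3)
--             camino.append((fila, columna))
--         laberinto[fila][columna] = 1
--         pila.append([fila, columna, 0])
--         return False
--
--     if entrar(0, 0):
--         return camino
--     while pila:
--         marco = pila[-1]
--         if marco[2] == 4:
--             pila.pop()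
--             camino.pop()
--             continue
--         d = direcciones[marco[2]]
--         marco[2] += 1
--         if entrar(marco[0] + d[0], marco[1] + d[1]):
--             return camino
--     return camino
-- ===== Notes on version B (the rewrite author's own statement) =====
-- stated objective: alternative
-- what changed: Replaces the recursive backtracking DFS by an iterative DFS driven by an explicit stack of (fila, columna, next-direction-index) frames with a single cell-entry helper; visit order, teleport handling and in-place marking are unchanged, so the returned path is identical.
-- outside the precondition, e.g. on encontrar_camino([[0, 2], [1]]): A returns [(0, 0), (0, 1)], B returns [(0, 0), (0, 1)]
import Mathlib
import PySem

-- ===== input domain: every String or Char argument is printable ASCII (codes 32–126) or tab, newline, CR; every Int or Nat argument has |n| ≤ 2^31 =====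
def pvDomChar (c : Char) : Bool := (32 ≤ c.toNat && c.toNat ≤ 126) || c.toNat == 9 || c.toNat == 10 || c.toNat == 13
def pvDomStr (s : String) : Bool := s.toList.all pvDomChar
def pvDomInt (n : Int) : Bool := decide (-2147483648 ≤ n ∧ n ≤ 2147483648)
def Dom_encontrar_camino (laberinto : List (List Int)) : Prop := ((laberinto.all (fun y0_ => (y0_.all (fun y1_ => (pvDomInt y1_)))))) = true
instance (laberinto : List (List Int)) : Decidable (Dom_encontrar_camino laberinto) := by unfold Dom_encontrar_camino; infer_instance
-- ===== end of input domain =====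

-- B rewrites the recursion as an explicit-stack DFS with the same visit order; equal return value
-- (both Pythons also mutate `laberinto` identically, marking visited cells 1).

-- shared primitive helpers (both Pythons read/scan/mark the maze with the same expressions)
-- laberinto[fila][columna] (total form; only used where the Pythons do not raise)
def pvCell (lab : List (List Int)) (f c : Int) : Int :=
  PySem.List.pyGetD (PySem.List.pyGetD lab f ([] : List Int)) c 0

-- len(laberinto[0]) (total form; A short-circuits before evaluating it when the maze is empty)
def pvCols (lab : List (List Int)) : Nat :=
  (PySem.List.pyGetD lab 0 ([] : List Int)).length

-- the out-of-bounds / wall guard shared by both Pythons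
def pvBlocked (lab : List (List Int)) (f c : Int) : Bool :=
  decide (f < 0) || decide (c < 0) || decide ((lab.length : Int) ≤ f) ||
  decide ((pvCols lab : Int) ≤ c) || (pvCell lab f c == 1)

-- encontrar_casilla (identical helper in both Pythons)
def pvFind (lab : List (List Int)) (v : Int) : Int × Int :=
  ((List.range lab.length).findSome? (fun (f : Nat) =>
      ((List.range (pvCols lab)).find? (fun (c : Nat) => pvCell lab (f : Int) (c : Int) == v)).map
        (fun (c : Nat) => ((f : Int), (c : Int))))).getD (-1, -1)

-- the teleport block (identical in both Pythons): possibly replaces position and path tail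
def pvTele (lab : List (List Int)) (f c : Int) (camino : List (Int × Int)) :
    Int × Int × List (Int × Int) :=
  if pvCell lab f c == 3 then
    let q := pvFind lab 4
    (q.1, q.2, camino.dropLast ++ [q])
  else if pvCell lab f c == 4 then
    let q := pvFind lab 3
    (q.1, q.2, camino.dropLast ++ [q])
  else (f, c, camino)

-- laberinto[fila][columna] = 1 (Python negative-index semantics via pySetD/pyGetD)
def pvMark (lab : List (List Int)) (f c : Int) : List (List Int) :=
  PySem.List.pySetD lab f (PySem.List.pySetD (PySem.List.pyGetD lab f ([] : List Int)) c (1 : Int))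

-- ===== PORT A =====
-- encontrar_camino_recursivo; fuel only makes the recursion total (never exhausted under Pre_)
def encontrar_camino_rec (fuel : Nat) (lab : List (List Int)) (f c : Int)
    (camino : List (Int × Int)) : Bool × List (List Int) × List (Int × Int) :=
  match fuel with
  | 0 => (false, lab, camino)
  | fuel + 1 =>
    if pvBlocked lab f c then (false, lab, camino)
    else
      let camino := camino ++ [(f, c)]
      if pvCell lab f c == 2 then (true, lab, camino)
      else
        let t := pvTele lab f c camino
        let lab := pvMark lab t.1 t.2.1
        match encontrar_camino_rec fuel lab (t.1 + 1) t.2.1 t.2.2 with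
        | (true, lab, camino) => (true, lab, camino)
        | (false, lab, camino) =>
          match encontrar_camino_rec fuel lab (t.1 - 1) t.2.1 camino with
          | (true, lab, camino) => (true, lab, camino)
          | (false, lab, camino) =>
            match encontrar_camino_rec fuel lab t.1 (t.2.1 + 1) camino with
            | (true, lab, camino) => (true, lab, camino)
            | (false, lab, camino) =>
              match encontrar_camino_rec fuel lab t.1 (t.2.1 - 1) camino with
              | (true, lab, camino) => (true, lab, camino)
              | (false, lab, camino) => (false, lab, camino.dropLast)

def encontrar_camino (laberinto : List (List Int)) : List (Int × Int) :=
  (encontrar_camino_rec (laberinto.length * pvCols laberinto + 2) laberinto 0 0 []).2.2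

-- ===== PORT B =====
def pvDir (k : Nat) : Int × Int :=
  match k with
  | 0 => (1, 0)
  | 1 => (-1, 0)
  | 2 => (0, 1)
  | _ => (0, -1)

-- entrar: one call head — guard, goal test, teleport, mark, open a frame
def pvEntrar (lab : List (List Int)) (camino : List (Int × Int))
    (pila : List (Int × Int × Nat)) (f c : Int) :
    Bool × List (List Int) × List (Int × Int) × List (Int × Int × Nat) :=
  if pvBlocked lab f c then (false, lab, camino, pila)
  else
    let camino := camino ++ [(f, c)]
    if pvCell lab f c == 2 then (true, lab, camino, pila)
    else
      let t := pvTele lab f c camino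
      (false, pvMark lab t.1 t.2.1, t.2.2, (t.1, t.2.1, 0) :: pila)

-- the while loop; fuel only makes it total (never exhausted under Pre_)
def pvRun (fuel : Nat) (lab : List (List Int)) (camino : List (Int × Int))
    (pila : List (Int × Int × Nat)) : List (List Int) × List (Int × Int) :=
  match fuel, pila with
  | _, [] => (lab, camino)
  | 0, _ => (lab, camino)
  | fuel + 1, (f, c, k) :: pila =>
    if k == 4 then pvRun fuel lab camino.dropLast pila
    else
      let d := pvDir k
      match pvEntrar lab camino ((f, c, k + 1) :: pila) (f + d.1) (c + d.2) with
      | (true, lab, camino, _) => (lab, camino)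
      | (false, lab, camino, pila) => pvRun fuel lab camino pila

def encontrar_camino_alt (laberinto : List (List Int)) : List (Int × Int) :=
  match pvEntrar laberinto [] [] 0 0 with
  | (true, _, camino, _) => camino
  | (false, lab, camino, pila) =>
    (pvRun (5 * 6 ^ (laberinto.length * pvCols laberinto + 1)) lab camino pila).2

-- ===== PRECONDITION & SPEC =====
-- Pre_ admits rectangular grids and any grid whose search stops at the start cell (out of bounds,
-- wall, or goal at (0,0)); it excludes other ragged grids (rows of differing length), on which A
-- raises IndexError whenever the search or a teleport scan reaches a row shorter than row 0, and
-- which A only survives accidentally when walls cut the search off first.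
def Pre_encontrar_camino (laberinto : List (List Int)) : Prop :=
  (∀ row ∈ laberinto, row.length = (laberinto.headD []).length) ∨
    laberinto = [] ∨ laberinto.headD [] = [] ∨
    (laberinto.headD []).headD 0 = 1 ∨ (laberinto.headD []).headD 0 = 2
instance (laberinto : List (List Int)) : Decidable (Pre_encontrar_camino laberinto) := by
  unfold Pre_encontrar_camino; infer_instance

def pvWitness_encontrar_camino : List (List Int) := [[0, 2]]

def Spec_encontrar_camino (laberinto : List (List Int)) (out : List (Int × Int)) : Prop := out = encontrar_camino_alt laberinto
instance (laberinto : List (List Int)) (out : List (Int × Int)) : Decidable (Spec_encontrar_camino laberinto out) := by unfold Spec_encontrar_camino; infer_instance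

-- ===== CLAIM (what is proved, stated in full; the proofs are below) =====
def Claim_equal_encontrar_camino : Prop := ∀ (laberinto : List (List Int)), Dom_encontrar_camino laberinto → Pre_encontrar_camino laberinto → Spec_encontrar_camino laberinto (encontrar_camino laberinto)

-- ===== LEMMAS AND PROOFS =====

-- number of cells that are not a wall (the strictly decreasing quantity of the search)
-- rectangularity, the shape invariant the search preserves (Pre_'s main disjunct)
def pvRect (lab : List (List Int)) : Prop :=
  ∀ row ∈ lab, row.length = pvCols lab

lemma pvCols_headD (lab : List (List Int)) : pvCols lab = (lab.headD []).length := by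
  cases lab <;> simp [pvCols, PySem.List.pyGetD_zero]

lemma pvCell00 (lab : List (List Int)) : pvCell lab 0 0 = (lab.headD []).headD 0 := by
  cases lab with
  | nil => rfl
  | cons a t =>
    simp only [pvCell, PySem.List.pyGetD_zero]
    cases a <;> rfl

def pvNon1 (lab : List (List Int)) : Nat :=
  (lab.map (fun row => row.countP (fun v => !(v == 1)))).sum

-- A's four-direction or-chain, resolved from direction index 4-j onwards (j tries left, then the pop)
def chainA (fuelC : Nat) (j : Nat) (lab : List (List Int)) (f c : Int)
    (camino : List (Int × Int)) : Bool × List (List Int) × List (Int × Int) :=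
  match j with
  | 0 => (false, lab, camino.dropLast)
  | j + 1 =>
    let d := pvDir (4 - (j + 1))
    match encontrar_camino_rec fuelC lab (f + d.1) (c + d.2) camino with
    | (true, lab, camino) => (true, lab, camino)
    | (false, lab, camino) => chainA fuelC j lab f c camino

lemma pyIdx_lt {n : Nat} {i : Int} {j : Nat} (h : PySem.List.pyIdx? n i = some j) : j < n := by
  unfold PySem.List.pyIdx? at h
  split_ifs at h with h1 h2 h3
  all_goals simp only [Option.some.injEq] at h
  all_goals omega

lemma pyGetD_idx {α : Type} (xs : List α) (i : Int) (j : Nat) (d : α)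
    (h : PySem.List.pyIdx? xs.length i = some j) :
    PySem.List.pyGetD xs i d = xs[j]'(pyIdx_lt h) := by
  simp [PySem.List.pyGetD, PySem.List.pyGet?, h, List.getElem?_eq_getElem (pyIdx_lt h)]

lemma pySetD_idx {α : Type} (xs : List α) (i : Int) (v : α) (j : Nat)
    (h : PySem.List.pyIdx? xs.length i = some j) :
    PySem.List.pySetD xs i v = xs.set j v := by
  simp [PySem.List.pySetD, PySem.List.pySet?, h]

lemma pySetD_none {α : Type} (xs : List α) (i : Int) (v : α)
    (h : PySem.List.pyIdx? xs.length i = none) :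
    PySem.List.pySetD xs i v = xs := by
  simp [PySem.List.pySetD, PySem.List.pySet?, h]

lemma pyIdx_of_range {n : Nat} {i : Int} (h0 : 0 ≤ i) (h1 : i < (n : Int)) :
    PySem.List.pyIdx? n i = some i.toNat := by
  unfold PySem.List.pyIdx?
  rw [if_pos h0, if_pos h1]

lemma sum_map_set (g : List Int → Nat) (lab : List (List Int)) (j : Nat) (r : List Int)
    (hj : j < lab.length) :
    ((lab.set j r).map g).sum + g (lab[j]'hj) = (lab.map g).sum + g r := by
  induction lab generalizing j with
  | nil => simp at hj
  | cons a l ih =>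
    cases j with
    | zero => simp; omega
    | succ j =>
      simp only [List.set_cons_succ, List.map_cons, List.sum_cons, List.getElem_cons_succ]
      have := ih j (by simpa using hj)
      omega

lemma countP_set (row : List Int) (i : Nat) (v : Int) (p : Int → Bool) (hi : i < row.length) :
    (row.set i v).countP p + (if p (row[i]'hi) then 1 else 0) =
      row.countP p + (if p v then 1 else 0) := by
  induction row generalizing i with
  | nil => simp at hi
  | cons a l ih =>
    cases i with
    | zero => simp [List.countP_cons]; split_ifs <;> omega
    | succ i =>
      simp only [List.set_cons_succ, List.countP_cons, List.getElem_cons_succ]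
      have := ih i (by simpa using hi)
      split_ifs at * <;> omega

lemma chainA_succ (fuelC j : Nat) (lab : List (List Int)) (f c : Int)
    (camino : List (Int × Int)) :
    chainA fuelC (j + 1) lab f c camino =
      match encontrar_camino_rec fuelC lab (f + (pvDir (4 - (j + 1))).1)
          (c + (pvDir (4 - (j + 1))).2) camino with
      | (true, lab', cam') => (true, lab', cam')
      | (false, lab', cam') => chainA fuelC j lab' f c cam' := rfl

lemma rec_blocked (fuel : Nat) (lab : List (List Int)) (f c : Int) (camino : List (Int × Int))
    (h : pvBlocked lab f c = true) :
    encontrar_camino_rec fuel lab f c camino = (false, lab, camino) := by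
  cases fuel with
  | zero => rfl
  | succ n => simp [encontrar_camino_rec, h]

lemma rec_succ (fuel : Nat) (lab : List (List Int)) (f c : Int) (camino : List (Int × Int)) :
    encontrar_camino_rec (fuel + 1) lab f c camino =
      if pvBlocked lab f c then (false, lab, camino)
      else
        let camino' := camino ++ [(f, c)]
        if pvCell lab f c == 2 then (true, lab, camino')
        else
          let t := pvTele lab f c camino'
          chainA fuel 4 (pvMark lab t.1 t.2.1) t.1 t.2.1 t.2.2 := by
  show _ = _
  conv_rhs => simp only [chainA, pvDir]
  simp only [encontrar_camino_rec]
  norm_num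
  rfl

lemma wrap_child_blocked (lab : List (List Int)) (k : Nat) (hk : k < 4) :
    pvBlocked lab (-1 + (pvDir k).1) (-1 + (pvDir k).2) = true := by
  interval_cases k <;> simp [pvDir, pvBlocked]

lemma pvMark_pre (lab : List (List Int)) (f c : Int) (h : pvRect lab) :
    pvRect (pvMark lab f c) := by
  unfold pvMark
  cases hidx : PySem.List.pyIdx? lab.length f with
  | none => rw [pySetD_none _ _ _ hidx]; exact h
  | some j =>
    have hj := pyIdx_lt hidx
    rw [pySetD_idx _ _ _ _ hidx, pyGetD_idx _ _ _ _ hidx]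
    set r := PySem.List.pySetD (lab[j]'hj) c 1 with hr
    have hrlen : r.length = (lab[j]'hj).length := by
      rw [hr]
      cases h2 : PySem.List.pyIdx? (lab[j]'hj).length c with
      | none => rw [pySetD_none _ _ _ h2]
      | some i => rw [pySetD_idx _ _ _ _ h2]; simp
    have hcols : pvCols (lab.set j r) = pvCols lab := by
      unfold pvCols
      rw [PySem.List.pyGetD_zero, PySem.List.pyGetD_zero]
      by_cases h0 : j = 0
      · subst h0
        rw [List.getD_eq_getElem?_getD, List.getD_eq_getElem?_getD]
        rw [List.getElem?_set_self (by omega), List.getElem?_eq_getElem hj]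
        simp only [Option.getD_some]
        exact hrlen
      · rw [List.getD_eq_getElem?_getD, List.getD_eq_getElem?_getD, List.getElem?_set_ne (by omega)]
    intro row hrow
    rw [hcols]
    rcases List.mem_or_eq_of_mem_set hrow with h1 | h1
    · exact h _ h1
    · subst h1; rw [hrlen]; exact h _ (List.getElem_mem hj)


lemma pvMark_non1_le (lab : List (List Int)) (f c : Int) :
    pvNon1 (pvMark lab f c) ≤ pvNon1 lab := by
  unfold pvMark
  cases h : PySem.List.pyIdx? lab.length f with
  | none => rw [pySetD_none _ _ _ h]
  | some j =>
    have hj := pyIdx_lt h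
    rw [pySetD_idx _ _ _ _ h, pyGetD_idx _ _ _ _ h]
    cases h2 : PySem.List.pyIdx? (lab[j]'hj).length c with
    | none =>
      rw [pySetD_none _ _ _ h2]
      unfold pvNon1
      have := sum_map_set (fun r => r.countP (fun v => !(v == 1))) lab j (lab[j]'hj) hj
      omega
    | some i =>
      have hi := pyIdx_lt h2
      rw [pySetD_idx _ _ _ _ h2]
      unfold pvNon1
      have h3 := sum_map_set (fun r => r.countP (fun v => !(v == 1))) lab j ((lab[j]'hj).set i 1) hj
      have h4 := countP_set (lab[j]'hj) i 1 (fun v => !(v == 1)) hi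
      have h5 : (!((1 : Int) == 1)) = false := by decide
      rw [h5] at h4
      norm_num at h4
      split_ifs at h4 <;> omega


lemma pvMark_non1_lt (lab : List (List Int)) (f c : Int) (hPre : pvRect lab)
    (h0f : 0 ≤ f) (hfr : f < (lab.length : Int)) (h0c : 0 ≤ c) (hcc : c < (pvCols lab : Int))
    (hne : pvCell lab f c ≠ 1) :
    pvNon1 (pvMark lab f c) < pvNon1 lab := by
  have h : PySem.List.pyIdx? lab.length f = some f.toNat := pyIdx_of_range h0f hfr
  have hj := pyIdx_lt h
  have hrowlen : (lab[f.toNat]'hj).length = pvCols lab := hPre _ (List.getElem_mem hj)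
  have h2 : PySem.List.pyIdx? (lab[f.toNat]'hj).length c = some c.toNat := by
    rw [hrowlen]; exact pyIdx_of_range h0c hcc
  have hi := pyIdx_lt h2
  have hcell : pvCell lab f c = (lab[f.toNat]'hj)[c.toNat]'hi := by
    unfold pvCell
    rw [pyGetD_idx _ _ _ _ h, pyGetD_idx _ _ _ _ h2]
  unfold pvMark
  rw [pySetD_idx _ _ _ _ h, pyGetD_idx _ _ _ _ h, pySetD_idx _ _ _ _ h2]
  unfold pvNon1
  have h3 := sum_map_set (fun r => r.countP (fun v => !(v == 1))) lab f.toNat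
    ((lab[f.toNat]'hj).set c.toNat 1) hj
  have h4 := countP_set (lab[f.toNat]'hj) c.toNat 1 (fun v => !(v == 1)) hi
  rw [← hcell] at h4
  have hp : (!(pvCell lab f c == 1)) = true := by simpa using hne
  rw [hp] at h4
  have h5 : (!((1 : Int) == 1)) = false := by decide
  rw [h5] at h4
  norm_num at h4
  omega


lemma pvFind_spec (lab : List (List Int)) (v : Int) :
    pvFind lab v = (-1, -1) ∨
      (0 ≤ (pvFind lab v).1 ∧ (pvFind lab v).1 < (lab.length : Int) ∧
       0 ≤ (pvFind lab v).2 ∧ (pvFind lab v).2 < (pvCols lab : Int) ∧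
       pvCell lab (pvFind lab v).1 (pvFind lab v).2 = v) := by
  unfold pvFind
  cases h : ((List.range lab.length).findSome? (fun (f : Nat) =>
      ((List.range (pvCols lab)).find? (fun (c : Nat) => pvCell lab (f : Int) (c : Int) == v)).map
        (fun (c : Nat) => ((f : Int), (c : Int))))) with
  | none => left; rfl
  | some p =>
    right
    obtain ⟨a, ha, hfa⟩ := List.exists_of_findSome?_eq_some h
    have haR := List.mem_range.mp ha
    cases hf : ((List.range (pvCols lab)).find? (fun (c : Nat) => pvCell lab (a : Int) (c : Int) == v)) with
    | none => rw [hf] at hfa; simp at hfa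
    | some cc =>
      rw [hf] at hfa
      simp only [Option.map_some, Option.some.injEq] at hfa
      have hcR : cc < pvCols lab := List.mem_range.mp (List.mem_of_find?_eq_some hf)
      have hcv : pvCell lab (a : Int) (cc : Int) = v := by
        have := List.find?_some hf
        simpa using this
      subst hfa
      simp only [Option.getD_some]
      refine ⟨by positivity, by exact_mod_cast haR, by positivity, by exact_mod_cast hcR, hcv⟩


lemma tele_spec (lab : List (List Int)) (f c : Int) (camino : List (Int × Int))
    (hb : pvBlocked lab f c = false) :
    ((pvTele lab f c camino).1 = -1 ∧ (pvTele lab f c camino).2.1 = -1) ∨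
      (0 ≤ (pvTele lab f c camino).1 ∧ (pvTele lab f c camino).1 < (lab.length : Int) ∧
       0 ≤ (pvTele lab f c camino).2.1 ∧ (pvTele lab f c camino).2.1 < (pvCols lab : Int) ∧
       pvCell lab (pvTele lab f c camino).1 (pvTele lab f c camino).2.1 ≠ 1) := by
  simp only [pvBlocked, Bool.or_eq_false_iff, decide_eq_false_iff_not, not_lt, not_le,
    beq_eq_false_iff_ne] at hb
  obtain ⟨⟨⟨⟨h1, h2⟩, h3⟩, h4⟩, h5⟩ := hb
  unfold pvTele
  split_ifs with hc3 hc4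
  · rcases pvFind_spec lab 4 with h | h
    · left; simp [h]
    · right; simp only; exact ⟨h.1, h.2.1, h.2.2.1, h.2.2.2.1, by rw [h.2.2.2.2]; omega⟩
  · rcases pvFind_spec lab 3 with h | h
    · left; simp [h]
    · right; simp only; exact ⟨h.1, h.2.1, h.2.2.1, h.2.2.2.1, by rw [h.2.2.2.2]; omega⟩
  · right; exact ⟨h1, h3, h2, h4, h5⟩


lemma chain_mono_of (fuelC : Nat)
    (hrec : ∀ (lab : List (List Int)) (f c : Int) (camino : List (Int × Int)),
      pvRect lab →
      pvRect (encontrar_camino_rec fuelC lab f c camino).2.1 ∧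
        pvNon1 (encontrar_camino_rec fuelC lab f c camino).2.1 ≤ pvNon1 lab) :
    ∀ (j : Nat) (lab : List (List Int)) (f c : Int) (camino : List (Int × Int)),
      pvRect lab →
      pvRect (chainA fuelC j lab f c camino).2.1 ∧
        pvNon1 (chainA fuelC j lab f c camino).2.1 ≤ pvNon1 lab := by
  intro j
  induction j with
  | zero => intro lab f c cam h; exact ⟨h, le_refl _⟩
  | succ j ih =>
    intro lab f c cam h
    simp only [chainA]
    rcases hr : encontrar_camino_rec fuelC lab (f + (pvDir (4 - (j + 1))).1)
        (c + (pvDir (4 - (j + 1))).2) cam with ⟨b, lab', cam'⟩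
    have h1 := hrec lab (f + (pvDir (4 - (j + 1))).1) (c + (pvDir (4 - (j + 1))).2) cam h
    rw [hr] at h1
    cases b with
    | true => exact h1
    | false =>
      have h2 := ih lab' f c cam' h1.1
      exact ⟨h2.1, le_trans h2.2 h1.2⟩

lemma rec_mono (fuel : Nat) : ∀ (lab : List (List Int)) (f c : Int) (camino : List (Int × Int)),
    pvRect lab →
    pvRect (encontrar_camino_rec fuel lab f c camino).2.1 ∧
      pvNon1 (encontrar_camino_rec fuel lab f c camino).2.1 ≤ pvNon1 lab := by
  induction fuel with
  | zero => intro lab f c cam h; exact ⟨h, le_refl _⟩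
  | succ fuel ih =>
    intro lab f c cam h
    rw [rec_succ]
    split_ifs with hb hc
    · exact ⟨h, le_refl _⟩
    · exact ⟨h, le_refl _⟩
    · have hpre2 := pvMark_pre lab (pvTele lab f c (cam ++ [(f, c)])).1
        (pvTele lab f c (cam ++ [(f, c)])).2.1 h
      have hle2 := pvMark_non1_le lab (pvTele lab f c (cam ++ [(f, c)])).1
        (pvTele lab f c (cam ++ [(f, c)])).2.1
      have h2 := chain_mono_of fuel ih 4 _ (pvTele lab f c (cam ++ [(f, c)])).1
        (pvTele lab f c (cam ++ [(f, c)])).2.1 (pvTele lab f c (cam ++ [(f, c)])).2.2 hpre2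
      exact ⟨h2.1, le_trans h2.2 hle2⟩


lemma chain_mono (fuelC : Nat) (j : Nat) : ∀ (lab : List (List Int)) (f c : Int)
    (camino : List (Int × Int)), pvRect lab →
    pvRect (chainA fuelC j lab f c camino).2.1 ∧
      pvNon1 (chainA fuelC j lab f c camino).2.1 ≤ pvNon1 lab := by
  exact chain_mono_of fuelC (rec_mono fuelC) j


lemma sum_le_mul {p : Int → Bool} : ∀ (l : List (List Int)) (m : Nat),
    (∀ row ∈ l, row.countP p ≤ m) → (l.map (fun row => row.countP p)).sum ≤ l.length * m := by
  intro l
  induction l with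
  | nil => simp
  | cons a t ih =>
    intro m hm
    simp only [List.map_cons, List.sum_cons, List.length_cons]
    have h1 := hm a List.mem_cons_self
    have h2 := ih m (fun r hr => hm r (List.mem_cons_of_mem _ hr))
    have : (t.length + 1) * m = t.length * m + m := by ring
    omega

lemma non1_le_size (lab : List (List Int)) (hPre : pvRect lab) :
    pvNon1 lab ≤ lab.length * pvCols lab := by
  unfold pvNon1
  exact sum_le_mul lab (pvCols lab) (fun row hr => by
    rw [← hPre row hr]; exact List.countP_le_length)


-- the simulation: the machine resolves a frame exactly as A's remaining or-chain, then continues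
lemma sim : ∀ (fuelC : Nat) (j : Nat), j ≤ 4 →
    ∀ (lab : List (List Int)) (f c : Int) (camino : List (Int × Int))
      (S : List (Int × Int × Nat)),
      pvRect lab →
      (pvNon1 lab < fuelC ∨ (f = -1 ∧ c = -1)) →
      ∃ cost, cost ≤ (j + 1) * 6 ^ (pvNon1 lab + 1) ∧
        ((f = -1 ∧ c = -1) → cost ≤ j + 1) ∧
        ∀ fuelM, cost ≤ fuelM →
          pvRun fuelM lab camino ((f, c, 4 - j) :: S) =
            (match chainA fuelC j lab f c camino with
             | (true, lab', cam') => (lab', cam')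
             | (false, lab', cam') => pvRun (fuelM - cost) lab' cam' S) := by
  intro fuelC
  induction fuelC with
  | zero =>
    intro j hj
    induction j with
    | zero =>
      intro lab f c cam S hPre hH
      refine ⟨1, ?_, fun _ => le_refl 1, ?_⟩
      · have h6 : 0 < 6 ^ (pvNon1 lab + 1) := by positivity
        omega
      · intro fuelM hM
        obtain ⟨m, rfl⟩ : ∃ m, fuelM = m + 1 := ⟨fuelM - 1, by omega⟩
        simp only [chainA, pvRun]
        norm_num
    | succ j ihj =>
      intro lab f c cam S hPre hH
      have hk4 : ((4 - (j + 1) : Nat) == 4) = false := by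
        simp only [beq_eq_false_iff_ne]; omega
      have hkk : 4 - (j + 1) + 1 = 4 - j := by omega
      by_cases hbl : pvBlocked lab (f + (pvDir (4 - (j + 1))).1) (c + (pvDir (4 - (j + 1))).2) = true
      · obtain ⟨cost_j, B1j, B2j, Rj⟩ := ihj (by omega) lab f c cam S hPre hH
        refine ⟨cost_j + 1, ?_, ?_, ?_⟩
        · have h6 : 0 < 6 ^ (pvNon1 lab + 1) := by positivity
          have heq : (j + 1 + 1) * 6 ^ (pvNon1 lab + 1)
              = (j + 1) * 6 ^ (pvNon1 lab + 1) + 6 ^ (pvNon1 lab + 1) := by ring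
          omega
        · intro hw; have := B2j hw; omega
        · intro fuelM hM
          obtain ⟨m, rfl⟩ : ∃ m, fuelM = m + 1 := ⟨fuelM - 1, by omega⟩
          simp only [pvRun, hk4, Bool.false_eq_true, if_false, pvEntrar, hbl, if_true, hkk]
          rw [chainA_succ, rec_blocked _ _ _ _ _ hbl]
          simp only
          rw [Rj m (by omega)]
          have harit : m + 1 - (cost_j + 1) = m - cost_j := by omega
          rw [harit]
      · have hblf : pvBlocked lab (f + (pvDir (4 - (j + 1))).1) (c + (pvDir (4 - (j + 1))).2) = false := by
          simpa using hbl
        have hnw : ¬ (f = -1 ∧ c = -1) := by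
          rintro ⟨rfl, rfl⟩
          rw [wrap_child_blocked lab (4 - (j + 1)) (by omega)] at hblf
          simp at hblf
        have hn : pvNon1 lab < 0 := hH.resolve_right hnw
        omega
  | succ fc ihf =>
    intro j hj
    induction j with
    | zero =>
      intro lab f c cam S hPre hH
      refine ⟨1, ?_, fun _ => le_refl 1, ?_⟩
      · have h6 : 0 < 6 ^ (pvNon1 lab + 1) := by positivity
        omega
      · intro fuelM hM
        obtain ⟨m, rfl⟩ : ∃ m, fuelM = m + 1 := ⟨fuelM - 1, by omega⟩
        simp only [chainA, pvRun]
        norm_num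
    | succ j ihj =>
      intro lab f c cam S hPre hH
      have hk4 : ((4 - (j + 1) : Nat) == 4) = false := by
        simp only [beq_eq_false_iff_ne]; omega
      have hkk : 4 - (j + 1) + 1 = 4 - j := by omega
      by_cases hbl : pvBlocked lab (f + (pvDir (4 - (j + 1))).1) (c + (pvDir (4 - (j + 1))).2) = true
      · -- child cell blocked: machine skips, A's chain skips
        obtain ⟨cost_j, B1j, B2j, Rj⟩ := ihj (by omega) lab f c cam S hPre hH
        refine ⟨cost_j + 1, ?_, ?_, ?_⟩
        · have h6 : 0 < 6 ^ (pvNon1 lab + 1) := by positivity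
          have heq : (j + 1 + 1) * 6 ^ (pvNon1 lab + 1)
              = (j + 1) * 6 ^ (pvNon1 lab + 1) + 6 ^ (pvNon1 lab + 1) := by ring
          omega
        · intro hw; have := B2j hw; omega
        · intro fuelM hM
          obtain ⟨m, rfl⟩ : ∃ m, fuelM = m + 1 := ⟨fuelM - 1, by omega⟩
          simp only [pvRun, hk4, Bool.false_eq_true, if_false, pvEntrar, hbl, if_true, hkk]
          rw [chainA_succ, rec_blocked _ _ _ _ _ hbl]
          simp only
          rw [Rj m (by omega)]
          have harit : m + 1 - (cost_j + 1) = m - cost_j := by omega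
          rw [harit]
      · have hblf : pvBlocked lab (f + (pvDir (4 - (j + 1))).1) (c + (pvDir (4 - (j + 1))).2) = false := by
          simpa using hbl
        have hnw : ¬ (f = -1 ∧ c = -1) := by
          rintro ⟨rfl, rfl⟩
          rw [wrap_child_blocked lab (4 - (j + 1)) (by omega)] at hblf
          simp at hblf
        have hn : pvNon1 lab < fc + 1 := hH.resolve_right hnw
        by_cases hc2 : (pvCell lab (f + (pvDir (4 - (j + 1))).1) (c + (pvDir (4 - (j + 1))).2) == 2) = true
        · -- child is the goal: both stop with the same path
          refine ⟨1, ?_, fun hw => absurd hw hnw, ?_⟩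
          · have h6 : 0 < 6 ^ (pvNon1 lab + 1) := by positivity
            have heq : (j + 1 + 1) * 6 ^ (pvNon1 lab + 1)
                = (j + 1) * 6 ^ (pvNon1 lab + 1) + 6 ^ (pvNon1 lab + 1) := by ring
            omega
          · intro fuelM hM
            obtain ⟨m, rfl⟩ : ∃ m, fuelM = m + 1 := ⟨fuelM - 1, by omega⟩
            simp only [pvRun, hk4, Bool.false_eq_true, if_false, pvEntrar, hblf, if_true, hc2]
            rw [chainA_succ, rec_succ]
            simp only [hblf, Bool.false_eq_true, if_false, hc2, if_true]
        · -- child expands: a new frame against A's nested call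
          have hc2f : (pvCell lab (f + (pvDir (4 - (j + 1))).1) (c + (pvDir (4 - (j + 1))).2) == 2) = false := by
            simpa using hc2
          have hrec : encontrar_camino_rec (fc + 1) lab (f + (pvDir (4 - (j + 1))).1) (c + (pvDir (4 - (j + 1))).2) cam
              = chainA fc 4
                  (pvMark lab
                    (pvTele lab (f + (pvDir (4 - (j + 1))).1) (c + (pvDir (4 - (j + 1))).2)
                      (cam ++ [(f + (pvDir (4 - (j + 1))).1, c + (pvDir (4 - (j + 1))).2)])).1
                    (pvTele lab (f + (pvDir (4 - (j + 1))).1) (c + (pvDir (4 - (j + 1))).2)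
                      (cam ++ [(f + (pvDir (4 - (j + 1))).1, c + (pvDir (4 - (j + 1))).2)])).2.1)
                  (pvTele lab (f + (pvDir (4 - (j + 1))).1) (c + (pvDir (4 - (j + 1))).2)
                    (cam ++ [(f + (pvDir (4 - (j + 1))).1, c + (pvDir (4 - (j + 1))).2)])).1
                  (pvTele lab (f + (pvDir (4 - (j + 1))).1) (c + (pvDir (4 - (j + 1))).2)
                    (cam ++ [(f + (pvDir (4 - (j + 1))).1, c + (pvDir (4 - (j + 1))).2)])).2.1
                  (pvTele lab (f + (pvDir (4 - (j + 1))).1) (c + (pvDir (4 - (j + 1))).2)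
                    (cam ++ [(f + (pvDir (4 - (j + 1))).1, c + (pvDir (4 - (j + 1))).2)])).2.2 := by
            rw [rec_succ]
            simp only [hblf, Bool.false_eq_true, if_false, hc2f]
          generalize hT : pvTele lab (f + (pvDir (4 - (j + 1))).1) (c + (pvDir (4 - (j + 1))).2)
              (cam ++ [(f + (pvDir (4 - (j + 1))).1, c + (pvDir (4 - (j + 1))).2)]) = T at hrec
          obtain ⟨tf, tc, tcam⟩ := T
          simp only at hrec
          have hPre2 : pvRect (pvMark lab tf tc) := pvMark_pre lab tf tc hPre
          have hml : pvNon1 (pvMark lab tf tc) ≤ pvNon1 lab := pvMark_non1_le lab tf tc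
          have hts := tele_spec lab (f + (pvDir (4 - (j + 1))).1) (c + (pvDir (4 - (j + 1))).2)
            (cam ++ [(f + (pvDir (4 - (j + 1))).1, c + (pvDir (4 - (j + 1))).2)]) hblf
          rw [hT] at hts
          simp only at hts
          have hH2 : pvNon1 (pvMark lab tf tc) < fc ∨ (tf = -1 ∧ tc = -1) := by
            rcases hts with hw | hr
            · right; exact hw
            · left
              have := pvMark_non1_lt lab tf tc hPre hr.1 hr.2.1 hr.2.2.1 hr.2.2.2.1 hr.2.2.2.2
              omega
          obtain ⟨cost4, B14, B24, R4⟩ := ihf 4 (le_refl 4) (pvMark lab tf tc) tf tc tcam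
            ((f, c, 4 - j) :: S) hPre2 hH2
          have h44 : (4 : Nat) - 4 = 0 := rfl
          rw [h44] at R4
          rcases hch : chainA fc 4 (pvMark lab tf tc) tf tc tcam with ⟨b, lab3, cam3⟩
          have hbound1 : cost4 + 1 ≤ 6 ^ (pvNon1 lab + 1) := by
            rcases hts with hw | hr
            · have h5 := B24 hw
              have h6 : 6 ≤ 6 ^ (pvNon1 lab + 1) := by
                calc (6 : Nat) = 6 ^ 1 := by norm_num
                _ ≤ 6 ^ (pvNon1 lab + 1) := Nat.pow_le_pow_right (by norm_num) (by omega)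
              omega
            · have hlt := pvMark_non1_lt lab tf tc hPre hr.1 hr.2.1 hr.2.2.1 hr.2.2.2.1 hr.2.2.2.2
              have he : 6 ^ (pvNon1 (pvMark lab tf tc) + 1) ≤ 6 ^ (pvNon1 lab) :=
                Nat.pow_le_pow_right (by norm_num) (by omega)
              have h61 : 6 ^ (pvNon1 lab + 1) = 6 * 6 ^ (pvNon1 lab) := by ring
              have h60 : 0 < 6 ^ (pvNon1 lab) := by positivity
              omega
          have hmul : 6 ^ (pvNon1 lab + 1) ≤ (j + 1 + 1) * 6 ^ (pvNon1 lab + 1) :=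
            Nat.le_mul_of_pos_left _ (by omega)
          cases b with
          | true =>
            refine ⟨cost4 + 1, ?_, fun hw => absurd hw hnw, ?_⟩
            · omega
            · intro fuelM hM
              obtain ⟨m, rfl⟩ : ∃ m, fuelM = m + 1 := ⟨fuelM - 1, by omega⟩
              simp only [pvRun, hk4, Bool.false_eq_true, if_false, pvEntrar, hblf, hc2f, hkk]
              rw [hT]
              simp only
              rw [R4 m (by omega), hch]
              simp only
              rw [chainA_succ, hrec, hch]
          | false =>
            have hc3 := chain_mono fc 4 (pvMark lab tf tc) tf tc tcam hPre2
            rw [hch] at hc3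
            simp only at hc3
            obtain ⟨cost_j, B1j, B2j, Rj⟩ := ihj (by omega) lab3 f c cam3 S hc3.1
              (Or.inl (by omega))
            refine ⟨1 + cost4 + cost_j, ?_, fun hw => absurd hw hnw, ?_⟩
            · have hmj : cost_j ≤ (j + 1) * 6 ^ (pvNon1 lab + 1) := by
                have hee : 6 ^ (pvNon1 lab3 + 1) ≤ 6 ^ (pvNon1 lab + 1) :=
                  Nat.pow_le_pow_right (by norm_num) (by omega)
                calc cost_j ≤ (j + 1) * 6 ^ (pvNon1 lab3 + 1) := B1j
                _ ≤ (j + 1) * 6 ^ (pvNon1 lab + 1) := Nat.mul_le_mul_left _ hee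
              have heq : (j + 1 + 1) * 6 ^ (pvNon1 lab + 1)
                  = (j + 1) * 6 ^ (pvNon1 lab + 1) + 6 ^ (pvNon1 lab + 1) := by ring
              omega
            · intro fuelM hM
              obtain ⟨m, rfl⟩ : ∃ m, fuelM = m + 1 := ⟨fuelM - 1, by omega⟩
              simp only [pvRun, hk4, Bool.false_eq_true, if_false, pvEntrar, hblf, hc2f, hkk]
              rw [hT]
              simp only
              rw [R4 m (by omega), hch]
              simp only
              rw [Rj (m - cost4) (by omega)]
              rw [chainA_succ, hrec, hch]
              simp only
              rcases hch2 : chainA (fc + 1) j lab3 f c cam3 with ⟨b2, lab4, cam4⟩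
              cases b2 with
              | true => simp only
              | false =>
                simp only
                have harit : m - cost4 - cost_j = m + 1 - (1 + cost4 + cost_j) := by omega
                rw [harit]


-- ===== VERDICT (by name: the statement is the Claim_ definition above) =====
lemma pvRun_nil (fuel : Nat) (lab : List (List Int)) (cam : List (Int × Int)) :
    pvRun fuel lab cam [] = (lab, cam) := by
  cases fuel <;> rfl

theorem encontrar_camino_spec : Claim_equal_encontrar_camino := by
  intro lab _hDom hPre
  unfold Spec_encontrar_camino encontrar_camino encontrar_camino_alt
  have h2 : lab.length * pvCols lab + 2 = (lab.length * pvCols lab + 1) + 1 := rfl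
  rw [h2, rec_succ]
  by_cases hb : pvBlocked lab 0 0 = true
  · simp only [hb, if_true, pvEntrar]
    rw [pvRun_nil]
  · have hbf : pvBlocked lab 0 0 = false := by simpa using hb
    by_cases hc : (pvCell lab 0 0 == 2) = true
    · simp only [hbf, Bool.false_eq_true, if_false, hc, if_true, pvEntrar, List.nil_append]
    · have hcf : (pvCell lab 0 0 == 2) = false := by simpa using hc
      have hrect : pvRect lab := by
        rcases hPre with h | h | h | h | h
        · intro row hr; rw [pvCols_headD]; exact h row hr
        · exfalso; subst h; exact absurd hbf (by decide)
        · exfalso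
          have hc0 : pvCols lab = 0 := by rw [pvCols_headD, h]; rfl
          have : pvBlocked lab 0 0 = true := by simp [pvBlocked, hc0]
          rw [this] at hbf; simp at hbf
        · exfalso
          have h1 : pvCell lab 0 0 = 1 := by rw [pvCell00, h]
          have : pvBlocked lab 0 0 = true := by simp [pvBlocked, h1]
          rw [this] at hbf; simp at hbf
        · exfalso
          rw [pvCell00, h] at hcf; simp at hcf
      simp only [hbf, Bool.false_eq_true, if_false, hcf, pvEntrar, List.nil_append]
      rcases hT : pvTele lab 0 0 [((0 : Int), (0 : Int))] with ⟨tf, tc, tcam⟩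
      simp only
      have hPre2 : pvRect (pvMark lab tf tc) := pvMark_pre lab tf tc hrect
      have hml : pvNon1 (pvMark lab tf tc) ≤ pvNon1 lab := pvMark_non1_le lab tf tc
      have hsz := non1_le_size lab hrect
      obtain ⟨cost, B1, _B2, R⟩ := sim (lab.length * pvCols lab + 1) 4 (le_refl 4)
        (pvMark lab tf tc) tf tc tcam [] hPre2 (Or.inl (by omega))
      have h44 : (4 : Nat) - 4 = 0 := rfl
      rw [h44] at R
      have hcost : cost ≤ 5 * 6 ^ (lab.length * pvCols lab + 1) := by
        have he : 6 ^ (pvNon1 (pvMark lab tf tc) + 1) ≤ 6 ^ (lab.length * pvCols lab + 1) :=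
          Nat.pow_le_pow_right (by norm_num) (by omega)
        calc cost ≤ (4 + 1) * 6 ^ (pvNon1 (pvMark lab tf tc) + 1) := B1
        _ ≤ 5 * 6 ^ (lab.length * pvCols lab + 1) := by omega
      rw [R (5 * 6 ^ (lab.length * pvCols lab + 1)) hcost]
      rcases hch : chainA (lab.length * pvCols lab + 1) 4 (pvMark lab tf tc) tf tc tcam
        with ⟨b, lab3, cam3⟩
      cases b with
      | true => simp only
      | false => simp only; rw [pvRun_nil]
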